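-- pv_equiv track=rewrite | github.com/jyleong/DailyCodingProblems | daily_coding_problem_74.py | count_mult
-- ===== SOURCE A (Python) =====
-- def count_mult(N, x):
--     count = 0
--     for i in range(1, N + 1):
--         for j in range(i, N+1):
--             if (i * j == x and i != j):
--                 count += 2
--             elif (i * j == x and i == j):
--                 count += 1
--     return count
-- ===== SOURCE B (Python) =====
-- def count_mult(N, x):
--     # Count ordered pairs (i, j) in [1,N]^2 with i*j == x by a single pass
--     # over i: the partner j = x // i is determined, so just check it.
--     count = 0
--     for i in range(1, N + 1):
--         if x % i == 0 and 1 <= x // i <= N: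
--             count += 1
--     return count
-- ===== Notes on version B (the rewrite author's own statement) =====
-- stated objective: faster
-- what changed: replaces the nested scan over all pairs (i,j) with a single pass over i that checks whether the unique partner j = x//i is an integer in range
import Mathlib
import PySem

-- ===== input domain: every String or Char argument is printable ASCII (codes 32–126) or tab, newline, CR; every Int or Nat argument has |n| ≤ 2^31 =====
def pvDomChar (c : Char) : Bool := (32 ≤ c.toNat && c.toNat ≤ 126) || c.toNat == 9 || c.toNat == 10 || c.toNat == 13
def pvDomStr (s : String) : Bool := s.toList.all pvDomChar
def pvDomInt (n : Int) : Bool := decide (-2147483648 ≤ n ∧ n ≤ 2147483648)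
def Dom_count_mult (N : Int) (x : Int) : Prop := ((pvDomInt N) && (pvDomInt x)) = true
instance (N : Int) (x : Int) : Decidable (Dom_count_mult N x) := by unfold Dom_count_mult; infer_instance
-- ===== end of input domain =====

-- B replaces A's O(N^2) scan over all pairs (i,j) with a single O(N) pass over i
-- that checks whether the unique partner j = x // i is an integer in [1, N].

-- ===== PORT A =====
def count_mult (N : Int) (x : Int) : Int :=
  (PySem.List.pyRange 1 (N + 1) 1).foldl (fun count i =>
    (PySem.List.pyRange i (N + 1) 1).foldl (fun c j =>
      if i * j = x ∧ ¬ i = j then c + 2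
      else if i * j = x ∧ i = j then c + 1
      else c) count) 0

-- ===== PORT B =====
def count_mult_alt (N : Int) (x : Int) : Int :=
  (PySem.List.pyRange 1 (N + 1) 1).foldl (fun count i =>
    if PySem.Int.mod x i = 0 ∧ (1 ≤ PySem.Int.floordiv x i ∧ PySem.Int.floordiv x i ≤ N)
    then count + 1 else count) 0

-- ===== PRECONDITION & SPEC =====
def Spec_count_mult (N : Int) (x : Int) (out : Int) : Prop := out = count_mult_alt N x
instance (N : Int) (x : Int) (out : Int) : Decidable (Spec_count_mult N x out) := by unfold Spec_count_mult; infer_instance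

-- ===== CLAIM (what is proved, stated in full; the proofs are below) =====
def Claim_equal_count_mult : Prop := ∀ (N : Int) (x : Int), Dom_count_mult N x → Spec_count_mult N x (count_mult N x)

-- ===== LEMMAS AND PROOFS =====

-- per-cell weight of A's inner loop
def fA (x i j : Int) : Int :=
  if i * j = x ∧ ¬ i = j then 2 else if i * j = x ∧ i = j then 1 else 0

-- per-index weight of B's loop
def gB (N x i : Int) : Int :=
  if PySem.Int.mod x i = 0 ∧ (1 ≤ PySem.Int.floordiv x i ∧ PySem.Int.floordiv x i ≤ N)
  then 1 else 0

def SA (N x : Int) : Int :=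
  ((PySem.List.pyRange 1 (N + 1) 1).map
    (fun i => ((PySem.List.pyRange i (N + 1) 1).map (fA x i)).sum)).sum

def SB (N x : Int) : Int :=
  ((PySem.List.pyRange 1 (N + 1) 1).map (gB N x)).sum

lemma count_mult_eq_SA (N x : Int) : count_mult N x = SA N x := by
  have hin : ∀ (c i : Int),
      (PySem.List.pyRange i (N + 1) 1).foldl (fun c j =>
        if i * j = x ∧ ¬ i = j then c + 2
        else if i * j = x ∧ i = j then c + 1
        else c) c = c + ((PySem.List.pyRange i (N + 1) 1).map (fA x i)).sum := by
    intro c i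
    have hf : (fun (c j : Int) =>
        if i * j = x ∧ ¬ i = j then c + 2
        else if i * j = x ∧ i = j then c + 1
        else c) = fun c j => c + fA x i j := by
      funext c j
      unfold fA
      split_ifs <;> omega
    rw [hf, PySem.List.foldl_add]
  unfold count_mult SA
  simp only [hin]
  rw [PySem.List.foldl_add
    ((PySem.List.pyRange 1 (N + 1) 1))
    (fun i => ((PySem.List.pyRange i (N + 1) 1).map (fA x i)).sum) 0]
  ring

lemma count_mult_alt_eq_SB (N x : Int) : count_mult_alt N x = SB N x := by
  have hf : (fun (count i : Int) =>
      if PySem.Int.mod x i = 0 ∧ (1 ≤ PySem.Int.floordiv x i ∧ PySem.Int.floordiv x i ≤ N)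
      then count + 1 else count) = fun count i => count + gB N x i := by
    funext c i
    unfold gB
    split_ifs <;> omega
  unfold count_mult_alt SB
  rw [hf, PySem.List.foldl_add]
  ring

-- sum of a point indicator over a list without duplicates
lemma sum_map_ite_eq (l : List Int) (hnd : l.Nodup) (a k : Int) :
    (l.map (fun i => if i = a then k else 0)).sum = if a ∈ l then k else 0 := by
  induction l with
  | nil => simp
  | cons b t ih =>
    rcases List.nodup_cons.mp hnd with ⟨hb, ht⟩
    rw [List.map_cons, List.sum_cons, ih ht]
    by_cases hba : b = a
    · subst hba
      simp [hb]
    · have hab : (a ∈ b :: t) ↔ (a ∈ t) := by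
        rw [List.mem_cons]
        exact or_iff_right (fun h => hba h.symm)
      simp only [if_neg hba, hab, zero_add]

-- peeling i = N off A's double sum
lemma SA_step (N x : Int) (hN1 : 1 ≤ N) :
    SA N x = SA (N - 1) x
      + ((PySem.List.pyRange 1 N 1).map (fun i => if i * N = x then (2 : Int) else 0)).sum
      + (if N * N = x then (1 : Int) else 0) := by
  unfold SA
  have hM : N - 1 + 1 = N := by ring
  rw [hM, PySem.List.pyRange_one_succ_right hN1, List.map_append, List.sum_append]
  have hlast : ((([N] : List Int)).map
      (fun i => ((PySem.List.pyRange i (N + 1) 1).map (fA x i)).sum)).sum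
      = if N * N = x then (1 : Int) else 0 := by
    have hsingle : PySem.List.pyRange N (N + 1) 1 = [N] := by
      rw [PySem.List.pyRange_one_succ_right (le_refl N),
          PySem.List.pyRange_one_eq_nil (le_refl N)]
      simp
    simp [hsingle, fA]
  have hinner : (PySem.List.pyRange 1 N 1).map
        (fun i => ((PySem.List.pyRange i (N + 1) 1).map (fA x i)).sum)
      = (PySem.List.pyRange 1 N 1).map
        (fun i => ((PySem.List.pyRange i N 1).map (fA x i)).sum
          + (if i * N = x then (2 : Int) else 0)) := by
    apply List.map_congr_left
    intro i hi
    rcases PySem.List.mem_pyRange_one.mp hi with ⟨hi1, hiN⟩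
    rw [PySem.List.pyRange_one_succ_right (le_of_lt hiN), List.map_append, List.sum_append]
    have hfa : fA x i N = if i * N = x then (2 : Int) else 0 := by
      unfold fA
      have : ¬ i = N := by omega
      split_ifs <;> simp_all
    simp [hfa]
  rw [hinner, PySem.List.sum_map_add_int, hlast]

-- peeling i = N and the bound N off B's sum
lemma SB_step (N x : Int) (hN1 : 1 ≤ N) :
    SB N x = SB (N - 1) x
      + ((PySem.List.pyRange 1 N 1).map
          (fun i => if PySem.Int.mod x i = 0 ∧ PySem.Int.floordiv x i = N
            then (1 : Int) else 0)).sum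
      + gB N x N := by
  unfold SB
  have hM : N - 1 + 1 = N := by ring
  rw [hM, PySem.List.pyRange_one_succ_right hN1, List.map_append, List.sum_append]
  have hg : (PySem.List.pyRange 1 N 1).map (gB N x)
      = (PySem.List.pyRange 1 N 1).map
        (fun i => gB (N - 1) x i
          + (if PySem.Int.mod x i = 0 ∧ PySem.Int.floordiv x i = N
             then (1 : Int) else 0)) := by
    apply List.map_congr_left
    intro i _
    unfold gB
    split_ifs <;> omega
  rw [hg, PySem.List.sum_map_add_int]
  simp [gB]

-- the two per-step increments agree
lemma step_eq (N x : Int) (hN1 : 1 ≤ N) :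
    ((PySem.List.pyRange 1 N 1).map (fun i => if i * N = x then (2 : Int) else 0)).sum
      + (if N * N = x then (1 : Int) else 0)
    = ((PySem.List.pyRange 1 N 1).map
        (fun i => if PySem.Int.mod x i = 0 ∧ PySem.Int.floordiv x i = N
          then (1 : Int) else 0)).sum
      + gB N x N := by
  have hNpos : (0 : Int) < N := by omega
  by_cases hdvd : N ∣ x
  · have hqN : x / N * N = x := Int.ediv_mul_cancel hdvd
    have hAmap : (PySem.List.pyRange 1 N 1).map
          (fun i => if i * N = x then (2 : Int) else 0)
        = (PySem.List.pyRange 1 N 1).map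
          (fun i => if i = x / N then (2 : Int) else 0) := by
      apply List.map_congr_left
      intro i _
      have hiff : i * N = x ↔ i = x / N := by
        constructor
        · intro h; nlinarith
        · intro h; rw [h]; exact hqN
      simp only [hiff]
    have hBmap : (PySem.List.pyRange 1 N 1).map
          (fun i => if PySem.Int.mod x i = 0 ∧ PySem.Int.floordiv x i = N
            then (1 : Int) else 0)
        = (PySem.List.pyRange 1 N 1).map
          (fun i => if i = x / N then (1 : Int) else 0) := by
      apply List.map_congr_left
      intro i hi
      rcases PySem.List.mem_pyRange_one.mp hi with ⟨hi1, hiN⟩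
      have hipos : (0 : Int) < i := by omega
      have hiff : (PySem.Int.mod x i = 0 ∧ PySem.Int.floordiv x i = N) ↔ i = x / N := by
        rw [PySem.Int.mod_eq_zero_iff_dvd, PySem.Int.floordiv_eq_ediv_of_pos hipos]
        constructor
        · rintro ⟨hd, he⟩
          have : x / i * i = x := Int.ediv_mul_cancel hd
          nlinarith
        · intro h
          subst h
          have hq0 : x / N ≠ 0 := by omega
          refine ⟨⟨N, by linarith⟩, ?_⟩
          calc x / (x / N) = x / N * N / (x / N) := by rw [hqN]
            _ = N := Int.mul_ediv_cancel_left N hq0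
      simp only [hiff]
    rw [hAmap, hBmap,
      sum_map_ite_eq _ (PySem.List.nodup_pyRange_one 1 N) (x / N) 2,
      sum_map_ite_eq _ (PySem.List.nodup_pyRange_one 1 N) (x / N) 1]
    have hNN : (N * N = x) ↔ N = x / N := by
      constructor
      · intro h; nlinarith
      · intro h; nlinarith
    have hgNN : gB N x N = if 1 ≤ x / N ∧ x / N ≤ N then (1 : Int) else 0 := by
      unfold gB
      simp only [PySem.Int.mod_eq_zero_iff_dvd, PySem.Int.floordiv_eq_ediv_of_pos hNpos]
      simp [hdvd]
    rw [hgNN]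
    have hmem : (x / N ∈ PySem.List.pyRange 1 N 1) ↔ 1 ≤ x / N ∧ x / N < N :=
      PySem.List.mem_pyRange_one
    by_cases hqmem : x / N ∈ PySem.List.pyRange 1 N 1
    · rcases hmem.mp hqmem with ⟨h1, h2⟩
      have hne : ¬ N * N = x := by
        intro hcontra
        rw [hNN] at hcontra
        omega
      rw [if_pos hqmem, if_pos hqmem, if_neg hne,
        if_pos (⟨h1, le_of_lt h2⟩ : 1 ≤ x / N ∧ x / N ≤ N)]
      ring
    · have hq' : ¬ (1 ≤ x / N ∧ x / N < N) := fun h => hqmem (hmem.mpr h)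
      rw [if_neg hqmem, if_neg hqmem]
      simp only [hNN]
      split_ifs <;> omega
  · have hA0 : (PySem.List.pyRange 1 N 1).map
        (fun i => if i * N = x then (2 : Int) else 0)
        = (PySem.List.pyRange 1 N 1).map (fun _ => (0 : Int)) := by
      apply List.map_congr_left
      intro i _
      have : ¬ i * N = x := by
        intro h; exact hdvd ⟨i, by linarith⟩
      simp [this]
    have hB0 : (PySem.List.pyRange 1 N 1).map
          (fun i => if PySem.Int.mod x i = 0 ∧ PySem.Int.floordiv x i = N
            then (1 : Int) else 0)
        = (PySem.List.pyRange 1 N 1).map (fun _ => (0 : Int)) := by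
      apply List.map_congr_left
      intro i hi
      rcases PySem.List.mem_pyRange_one.mp hi with ⟨hi1, hiN⟩
      have hipos : (0 : Int) < i := by omega
      have hni : ¬ (PySem.Int.mod x i = 0 ∧ PySem.Int.floordiv x i = N) := by
        rintro ⟨hd, he⟩
        rw [PySem.Int.mod_eq_zero_iff_dvd] at hd
        rw [PySem.Int.floordiv_eq_ediv_of_pos hipos] at he
        have : x / i * i = x := Int.ediv_mul_cancel hd
        exact hdvd ⟨i, by nlinarith⟩
      simp [hni]
    have hNN0 : ¬ N * N = x := by
      intro h; exact hdvd ⟨N, by linarith⟩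
    have hg0 : gB N x N = 0 := by
      unfold gB
      simp only [PySem.Int.mod_eq_zero_iff_dvd]
      simp [hdvd]
    rw [hA0, hB0, hg0]
    simp [hNN0]

lemma SA_eq_SB_nat (n : Nat) : ∀ x : Int, SA (n : Int) x = SB (n : Int) x := by
  induction n with
  | zero =>
    intro x
    unfold SA SB
    rw [PySem.List.pyRange_one_eq_nil (by norm_num)]
    simp
  | succ m ih =>
    intro x
    have hN1 : (1 : Int) ≤ ((m + 1 : Nat) : Int) := by
      push_cast; omega
    have hM : ((m + 1 : Nat) : Int) - 1 = (m : Int) := by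
      push_cast; ring
    rw [SA_step _ x hN1, SB_step _ x hN1, hM, ih x]
    have := step_eq ((m + 1 : Nat) : Int) x hN1
    linarith

lemma SA_eq_SB (N x : Int) : SA N x = SB N x := by
  by_cases h : N ≤ 0
  · unfold SA SB
    rw [PySem.List.pyRange_one_eq_nil (by omega)]
    simp
  · have : N = ((N.toNat : Nat) : Int) := by omega
    rw [this]
    exact SA_eq_SB_nat N.toNat x

-- ===== VERDICT (by name: the statement is the Claim_ definition above) =====
theorem count_mult_spec : Claim_equal_count_mult := by
  intro N x _
  unfold Spec_count_mult
  rw [count_mult_eq_SA, count_mult_alt_eq_SB, SA_eq_SB]
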